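-- pv_equiv track=rewrite | github.com/alwaysday4u/Coding_test | Programmers/Level 2/n진수 게임.py | solution
-- ===== SOURCE A (Python) =====
-- def decToNum(num, mod):
--     nList = "0123456789ABCDEF"
--     a, b = num//mod, num%mod
--     if a:
--         return decToNum(a, mod)+nList[b]
--     else:
--         return nList[b]
--
-- def solution(n, t, m, p):
--     pList = []
--     game=''
--     for i in range(m*t):
--         game+=str(decToNum(i,n))
--     for _ in range(t):
--         pList.append(game[p-1])
--         p+=m
--     return ''.join(pList)
-- ===== SOURCE B (Python) =====
-- def solution(n, t, m, p):
--     alphabet = "0123456789ABCDEF"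
--     targets = [p - 1 + k * m for k in range(t)]
--     out = []
--     consumed = 0
--     j = 0  # index of the next target position still to find
--     for i in range(m * t):
--         if j == len(targets):
--             break  # all wanted positions already found
--         # base-n digits of i, least significant first, then reversed
--         digits = []
--         x = i
--         while True:
--             x, r = divmod(x, n)
--             digits.append(alphabet[r])
--             if not x:
--                 break
--         digits.reverse()
--         length = len(digits)
--         while j < len(targets) and consumed <= targets[j] < consumed + length:
--             out.append(digits[targets[j] - consumed])
--             j += 1
--         consumed += length
--     if j < len(targets):
--         raise IndexError("string index out of range")
--     return ''.join(out)
-- ===== Notes on version B (the rewrite author's own statement) =====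
-- stated objective: alternative
-- what changed: B never materialises the concatenated game string: it streams the numbers 0..m*t-1 once, keeping a running total of digit positions consumed and a pointer into the increasing list of wanted positions p-1+k*m, emits each wanted character straight from that number's digit list, and stops as soon as every wanted position is found.
-- outside the precondition, e.g. on solution(2, 1, 2, -1): A returns '0', B raises IndexError; on solution(2, 1, 3, 4): A returns '0', B returns '0'; on solution(-2, 1, 2, 1): A returns '0', B returns '0'
import Mathlib
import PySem

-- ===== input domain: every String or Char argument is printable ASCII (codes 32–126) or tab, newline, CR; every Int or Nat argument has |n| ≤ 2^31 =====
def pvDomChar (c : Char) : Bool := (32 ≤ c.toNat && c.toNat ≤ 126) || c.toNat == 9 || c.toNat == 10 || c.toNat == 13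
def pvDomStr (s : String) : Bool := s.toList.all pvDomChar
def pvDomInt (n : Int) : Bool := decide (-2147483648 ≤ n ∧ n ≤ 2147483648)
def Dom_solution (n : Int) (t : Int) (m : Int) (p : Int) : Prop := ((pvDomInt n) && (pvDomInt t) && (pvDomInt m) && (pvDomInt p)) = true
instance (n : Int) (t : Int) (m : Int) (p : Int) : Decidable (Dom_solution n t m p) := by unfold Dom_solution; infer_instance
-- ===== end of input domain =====

-- B streams over the numbers 0..m*t-1 once with a running position total and a pointer into
-- the wanted positions, instead of building the whole concatenated game string (alternative
-- decomposition, same cost). Return-value equivalence proved on Pre_solution below.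

-- ===== PORT A =====
def nListA : List Char := "0123456789ABCDEF".toList

-- Python's decToNum recursion, with fuel (num.toNat+1 suffices on Pre_; Python diverges/raises
-- only outside Pre_). nList[b] is pyGet?; the .getD default is reached only where Python raises.
def decToNumA (fuel : Nat) (num mod : Int) : List Char :=
  match fuel with
  | 0 => []
  | Nat.succ f =>
    let a := PySem.Int.floordiv num mod
    let b := PySem.Int.mod num mod
    let c := (PySem.List.pyGet? nListA b).getD ' '
    if a ≠ 0 then decToNumA f a mod ++ [c] else [c]

def solution (n : Int) (t : Int) (m : Int) (p : Int) : String :=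
  let game := (PySem.List.pyRange 0 (m*t) 1).foldl (fun g i => g ++ decToNumA (i.toNat+1) i n) []
  let st := (PySem.List.pyRange 0 t 1).foldl
      (fun (st : List Char × Int) _ =>
        (st.1 ++ [(PySem.List.pyGet? game (st.2 - 1)).getD ' '], st.2 + m))
      ([], p)
  String.mk st.1

-- ===== PORT B =====
def alphabetB : List Char := "0123456789ABCDEF".toList

-- Source B's inner while-loop: base-n digits of x, least significant first (fuel as in decToNumA)
def digitsB (fuel : Nat) (x n : Int) : List Char :=
  match fuel with
  | 0 => []
  | Nat.succ f =>
    let q := PySem.Int.floordiv x n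
    let r := PySem.Int.mod x n
    let c := (PySem.List.pyGet? alphabetB r).getD ' '
    if q = 0 then [c] else c :: digitsB f q n

-- Source B's second while-loop: emit the targets that fall inside the current number's digits
def grabB (ds : List Char) (consumed : Int) : List Int → List Char × List Int
  | [] => ([], [])
  | x :: ts =>
    if consumed ≤ x ∧ x < consumed + (ds.length : Int) then
      let c := (PySem.List.pyGet? ds (x - consumed)).getD ' '
      let r := grabB ds consumed ts
      (c :: r.1, r.2)
    else ([], x :: ts)

def solution_alt (n : Int) (t : Int) (m : Int) (p : Int) : String :=
  let targets := (PySem.List.pyRange 0 t 1).map (fun k => p - 1 + k * m)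
  let st := (PySem.List.pyRange 0 (m*t) 1).foldl
      (fun (st : List Char × Int × List Int) i =>
        if st.2.2 = [] then st  -- break: every wanted position already found
        else
          let ds := (digitsB (i.toNat+1) i n).reverse
          let g := grabB ds st.2.1 st.2.2
          (st.1 ++ g.1, st.2.1 + (ds.length : Int), g.2))
      ([], 0, targets)
  -- Python raises IndexError iff st.2.2 ≠ []; on Pre_ it is always []
  String.mk st.1

-- ===== PRECONDITION & SPEC =====
-- Pre_ is the puzzle's stated domain (2 ≤ n ≤ 16, t ≥ 1, m ≥ 1, 1 ≤ p ≤ m), widened by the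
-- degenerate regions where Python A also returns: t ≤ 0 (no picks, A returns ''), and bases
-- outside 2..16 whenever no digit ever reaches the game string's 16-symbol alphabet limit
-- (n = 1 with m*t ≤ 1, n ≥ 17 with m*t ≤ 16). Outside Pre_, Python A
-- raises (ZeroDivisionError / RecursionError / IndexError), or returns a value only through
-- Python's negative-index wraparound (p ≤ 0), or through trailing digit positions past the m*t-th
-- character whose existence depends on digit lengths (p > m) — on some of those A and B still agree.
def Pre_solution (n : Int) (t : Int) (m : Int) (p : Int) : Prop :=
  (t ≤ 0 ∧ (m * t ≤ 0 ∨ (2 ≤ n ∧ n ≤ 16) ∨ (n = 1 ∧ m * t ≤ 1) ∨ (17 ≤ n ∧ m * t ≤ 16)))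
  ∨ (1 ≤ t ∧ 1 ≤ m ∧ 1 ≤ p ∧ p ≤ m ∧
      ((2 ≤ n ∧ n ≤ 16) ∨ (n = 1 ∧ m * t ≤ 1) ∨ (17 ≤ n ∧ m * t ≤ 16)))
instance (n : Int) (t : Int) (m : Int) (p : Int) : Decidable (Pre_solution n t m p) := by
  unfold Pre_solution; infer_instance

def pvWitness_solution : Int × Int × Int × Int := (2, 3, 2, 1)

def Spec_solution (n : Int) (t : Int) (m : Int) (p : Int) (out : String) : Prop := out = solution_alt n t m p
instance (n : Int) (t : Int) (m : Int) (p : Int) (out : String) : Decidable (Spec_solution n t m p out) := by unfold Spec_solution; infer_instance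

-- ===== CLAIM (what is proved, stated in full; the proofs are below) =====
def Claim_equal_solution : Prop := ∀ (n : Int) (t : Int) (m : Int) (p : Int), Dom_solution n t m p → Pre_solution n t m p → Spec_solution n t m p (solution n t m p)

-- ===== LEMMAS AND PROOFS =====

theorem nListA_eq_alphabetB : nListA = alphabetB := rfl

-- A's recursive digit string is B's least-significant-first digit list, reversed
theorem decToNumA_eq_digitsB_reverse (f : Nat) (x n : Int) :
    decToNumA f x n = (digitsB f x n).reverse := by
  induction f generalizing x with
  | zero => rfl
  | succ f ih =>
    simp only [decToNumA, digitsB, nListA_eq_alphabetB]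
    by_cases h : PySem.Int.floordiv x n = 0
    · simp [h]
    · simp [h, ih]

-- every digit list is nonempty
theorem digitsB_ne_nil (f : Nat) (x n : Int) : (digitsB (Nat.succ f) x n).reverse ≠ [] := by
  simp only [digitsB]
  by_cases h : PySem.Int.floordiv x n = 0 <;> simp [h]

-- nonempty pieces: at least as many characters as pieces
theorem length_le_flatten {α : Type} (ps : List (List α)) (h : ∀ q ∈ ps, q ≠ []) :
    ps.length ≤ ps.flatten.length := by
  induction ps with
  | nil => simp
  | cons d ps ih =>
    have hd : d ≠ [] := h d (by simp)
    have : 1 ≤ d.length := by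
      cases d with
      | nil => exact absurd rfl hd
      | cons a l => simp
    simp only [List.length_cons, List.flatten_cons, List.length_append]
    have := ih (fun q hq => h q (by simp [hq]))
    omega

-- A's picking loop: characters of game at p-1, p-1+m, …
theorem pickLoop_spec (game : List Char) (m : Int) (L : List Int) :
    ∀ (acc : List Char) (q : Int),
    L.foldl (fun (st : List Char × Int) _ =>
        (st.1 ++ [(PySem.List.pyGet? game (st.2 - 1)).getD ' '], st.2 + m)) (acc, q)
      = (acc ++ (List.range L.length).map
            (fun (k : Nat) => (PySem.List.pyGet? game (q - 1 + (k : Int) * m)).getD ' '),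
         q + (L.length : Int) * m) := by
  induction L with
  | nil => intro acc q; simp
  | cons i L ih =>
    intro acc q
    simp only [List.foldl_cons, ih, List.length_cons, List.range_succ_eq_map, List.map_cons,
      List.map_map, Prod.mk.injEq]
    constructor
    · rw [List.append_assoc, List.singleton_append]
      congr 1
      congr 1
      · congr 2; push_cast; ring
      · apply List.map_congr_left
        intro k _
        simp only [Function.comp]
        congr 2
        push_cast
        ring
    · push_cast; ring

-- grabB splits the (sorted, ≥ consumed) target list at consumed + ds.length
theorem grabB_spec (ds : List Char) (c : Int) (ts : List Int)
    (hge : ∀ x ∈ ts, c ≤ x) (hs : ts.Pairwise (· ≤ ·)) :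
    grabB ds c ts
      = ((ts.takeWhile (fun x => decide (x < c + (ds.length : Int)))).map
            (fun x => (PySem.List.pyGet? ds (x - c)).getD ' '),
         ts.dropWhile (fun x => decide (x < c + (ds.length : Int)))) := by
  induction ts with
  | nil => rfl
  | cons x ts ih =>
    have hx : c ≤ x := hge x (by simp)
    by_cases hlt : x < c + (ds.length : Int)
    · have := ih (fun y hy => hge y (by simp [hy])) hs.of_cons
      simp [grabB, hx, hlt, this]
    · simp [grabB, hlt]

-- once every target is found, B's guarded fold is the identity (the ported break)
theorem streamLoop_skip (pc : Int → List Char) (L : List Int) (acc : List Char) (c : Int) :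
    L.foldl (fun (st : List Char × Int × List Int) i =>
        if st.2.2 = [] then st
        else
          (st.1 ++ (grabB (pc i) st.2.1 st.2.2).1,
           st.2.1 + ((pc i).length : Int),
           (grabB (pc i) st.2.1 st.2.2).2)) (acc, c, []) = (acc, c, []) := by
  induction L with
  | nil => rfl
  | cons i L ih => simp [List.foldl_cons, ih]

-- B's streaming fold: with sorted in-range targets it maps each target to the character of the
-- flattened pieces at that position, and consumes all targets
theorem streamLoop_spec (pc : Int → List Char) (L : List Int) :
    ∀ (acc : List Char) (c : Int) (ts : List Int),
    ts.Pairwise (· ≤ ·) →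
    (∀ x ∈ ts, c ≤ x ∧ x - c < ((L.map pc).flatten.length : Int)) →
    ∃ c' : Int,
    L.foldl (fun (st : List Char × Int × List Int) i =>
        if st.2.2 = [] then st
        else
          (st.1 ++ (grabB (pc i) st.2.1 st.2.2).1,
           st.2.1 + ((pc i).length : Int),
           (grabB (pc i) st.2.1 st.2.2).2)) (acc, c, ts)
      = (acc ++ ts.map (fun x => (PySem.List.pyGet? (L.map pc).flatten (x - c)).getD ' '),
         c', []) := by
  induction L with
  | nil =>
    intro acc c ts hs hb
    have hts : ts = [] := by
      cases ts with
      | nil => rfl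
      | cons x ts =>
        have := hb x (by simp)
        simp at this
        omega
    exact ⟨c, by simp [hts]⟩
  | cons i L ih =>
    intro acc c ts hs hb
    by_cases hts0 : ts = []
    · subst hts0
      exact ⟨c, by
        simp only [List.foldl_cons, if_true]
        rw [streamLoop_skip]
        simp⟩
    simp only [List.foldl_cons]
    rw [if_neg (by simpa using hts0)]
    have hge : ∀ x ∈ ts, c ≤ x := fun x hx => (hb x hx).1
    rw [grabB_spec (pc i) c ts hge hs]
    set P : Int → Bool := fun x => decide (x < c + ((pc i).length : Int)) with hP
    have hsplit : ts.takeWhile P ++ ts.dropWhile P = ts := List.takeWhile_append_dropWhile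
    -- every dropped target is ≥ c + |pc i|
    have hdrop_ge : ∀ x ∈ ts.dropWhile P, c + ((pc i).length : Int) ≤ x := by
      intro x hx
      rcases hdw : ts.dropWhile P with _ | ⟨y, ys⟩
      · rw [hdw] at hx; simp at hx
      · have hy : c + ((pc i).length : Int) ≤ y := by
          have hnil : ts.dropWhile P ≠ [] := by simp [hdw]
          have hhd := List.head_dropWhile_not P (l := ts) hnil
          have hhy : (ts.dropWhile P).head hnil = y := by simp [hdw]
          rw [hhy] at hhd
          simp only [hP, decide_eq_false_iff_not, not_lt] at hhd
          exact hhd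
        have hpw : (ts.dropWhile P).Pairwise (· ≤ ·) := hs.sublist (List.dropWhile_sublist P)
        rw [hdw] at hpw hx
        rw [List.mem_cons] at hx
        rcases hx with hx | hx
        · omega
        · have := (List.pairwise_cons.mp hpw).1 x hx
          omega
    have hdrop_bound : ∀ x ∈ ts.dropWhile P,
        c + ((pc i).length : Int) ≤ x ∧
        x - (c + ((pc i).length : Int)) < ((L.map pc).flatten.length : Int) := by
      intro x hx
      have hmem : x ∈ ts := (List.dropWhile_sublist P).mem hx
      have hbx := hb x hmem
      have h1 := hdrop_ge x hx
      refine ⟨h1, ?_⟩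
      simp only [List.map_cons, List.flatten_cons, List.length_append] at hbx
      push_cast at hbx ⊢
      omega
    have hdpw : (ts.dropWhile P).Pairwise (· ≤ ·) := hs.sublist (List.dropWhile_sublist P)
    obtain ⟨c2, hih⟩ := ih
      (acc ++ (ts.takeWhile P).map (fun x => (PySem.List.pyGet? (pc i) (x - c)).getD ' '))
      (c + ((pc i).length : Int)) (ts.dropWhile P) hdpw hdrop_bound
    refine ⟨c2, ?_⟩
    rw [hih]
    simp only [List.map_cons, List.flatten_cons, Prod.mk.injEq]
    refine ⟨?_, by simp⟩
    rw [List.append_assoc]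
    congr 1
    conv_rhs => rw [← hsplit]
    rw [List.map_append]
    congr 1
    · -- taken targets index into pc i
      apply List.map_congr_left
      intro x hx
      have hxlt : x < c + ((pc i).length : Int) := by
        have := List.mem_takeWhile_imp hx
        simpa [hP] using this
      have hxge : c ≤ x := hge x ((List.takeWhile_sublist P).mem hx)
      rw [PySem.List.pyGet?_of_nonneg (pc i) (by omega),
        PySem.List.pyGet?_of_nonneg (pc i ++ (List.map pc L).flatten) (by omega),
        List.getElem?_append_left (by omega)]
    · -- dropped targets index into the remaining flatten
      apply List.map_congr_left
      intro x hx
      have h1 := hdrop_ge x hx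
      have hxge : c ≤ x := hge x ((List.dropWhile_sublist P).mem hx)
      rw [PySem.List.pyGet?_of_nonneg ((List.map pc L).flatten) (by omega),
        PySem.List.pyGet?_of_nonneg (pc i ++ (List.map pc L).flatten) (by omega),
        List.getElem?_append_right (by omega)]
      have hidx : (x - (c + ((pc i).length : Int))).toNat = (x - c).toNat - (pc i).length := by omega
      rw [hidx]

-- ===== VERDICT (by name: the statement is the Claim_ definition above) =====
theorem solution_spec : Claim_equal_solution := by
  intro n t m p _ hpre
  unfold Spec_solution solution solution_alt
  dsimp only
  apply congrArg String.mk
  rcases hpre with ⟨ht0, _⟩ | ⟨ht, hm, hp1, hpm, _⟩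
  · -- t ≤ 0: no picks on either side, both return the empty string
    have hskip := streamLoop_skip (fun i => (digitsB (i.toNat + 1) i n).reverse)
      (PySem.List.pyRange 0 (m*t) 1) [] 0
    beta_reduce at hskip
    rw [PySem.List.pyRange_one_eq_nil (by omega : t ≤ 0)]
    simp only [List.map_nil, List.foldl_nil]
    rw [hskip]
  have hne : ∀ i : Int, (digitsB (i.toNat + 1) i n).reverse ≠ [] :=
    fun i => digitsB_ne_nil i.toNat i n
  have hflat : (m * t).toNat
      ≤ ((PySem.List.pyRange 0 (m*t) 1).map (fun i => (digitsB (i.toNat + 1) i n).reverse)).flatten.length := by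
    have h1 := length_le_flatten
      ((PySem.List.pyRange 0 (m*t) 1).map (fun i => (digitsB (i.toNat + 1) i n).reverse)) (by
        intro q hq
        rcases List.mem_map.mp hq with ⟨i, _, rfl⟩
        exact hne i)
    rw [List.length_map, PySem.List.length_pyRange_one] at h1
    omega
  have hsorted : ((PySem.List.pyRange 0 t 1).map (fun k => p - 1 + k * m)).Pairwise (· ≤ ·) := by
    apply List.Pairwise.map
    · intro a b hab
      have : a * m ≤ b * m := mul_le_mul_of_nonneg_right (le_of_lt hab) (by omega)
      omega
    · exact PySem.List.pairwise_lt_pyRange_one 0 t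
  have hbound : ∀ x ∈ (PySem.List.pyRange 0 t 1).map (fun k => p - 1 + k * m),
      (0:Int) ≤ x ∧ x - 0 <
        ((((PySem.List.pyRange 0 (m*t) 1).map (fun i => (digitsB (i.toNat + 1) i n).reverse)).flatten.length : Int)) := by
    intro x hx
    rcases List.mem_map.mp hx with ⟨k, hk, rfl⟩
    have hk' := (PySem.List.mem_pyRange_one).mp hk
    have h1 : (0:Int) ≤ k * m := mul_nonneg (by omega) (by omega)
    have h2 : k * m ≤ (t - 1) * m := mul_le_mul_of_nonneg_right (by omega) (by omega)
    have hlt : p - 1 + k * m < m * t := by nlinarith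
    have hfl := hflat
    omega
  obtain ⟨cfin, hB⟩ := streamLoop_spec (fun i => (digitsB (i.toNat + 1) i n).reverse)
    (PySem.List.pyRange 0 (m*t) 1) [] 0
    ((PySem.List.pyRange 0 t 1).map (fun k => p - 1 + k * m)) hsorted hbound
  rw [hB]
  have hgame : (PySem.List.pyRange 0 (m*t) 1).foldl
      (fun g i => g ++ decToNumA (i.toNat + 1) i n) []
      = ((PySem.List.pyRange 0 (m*t) 1).map (fun i => (digitsB (i.toNat + 1) i n).reverse)).flatten := by
    rw [PySem.List.foldl_append_eq_flatMap]
    simp [List.flatMap_def, decToNumA_eq_digitsB_reverse]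
  rw [hgame]
  rw [pickLoop_spec
    (((PySem.List.pyRange 0 (m*t) 1).map (fun i => (digitsB (i.toNat + 1) i n).reverse)).flatten)
    m (PySem.List.pyRange 0 t 1) [] p]
  simp only [List.nil_append, List.map_map]
  rw [PySem.List.length_pyRange_one, PySem.List.pyRange_one 0 t, List.map_map]
  apply List.map_congr_left
  intro k _
  simp only [Function.comp]
  congr 2
  ring
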